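-- pv_equiv track=rewrite | github.com/cmac41691/lighthouse-python-essentials | projects/chapter4/list_practice.py | unique_sorted_case_insensitive
-- ===== SOURCE A (Python) =====
-- def unique_sorted_case_insensitive(names):
--     """
--     Return unique names sorted A->Z case-insensitively,
--     but keep the first original casing seen.
--     """
--     seen_lower = set()
--     unique = []
--     for n in names:
--         key = n.lower()
--         if key not in seen_lower:
--             unique.append(n)
--             seen_lower.add(key)
--     return sorted(unique, key=str.lower)
-- ===== SOURCE B (Python) =====
-- def unique_sorted_case_insensitive(names):
--     """
--     Stable case-insensitive sort first, then one adjacent-dedup pass: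
--     stability guarantees the first original casing seen comes first
--     within each group of equal lowercase keys.
--     """
--     ordered = sorted(names, key=lambda n: n.lower())
--     out = []
--     prev_key = None
--     for n in ordered:
--         k = n.lower()
--         if k != prev_key:
--             out.append(n)
--             prev_key = k
--     return out
-- ===== Notes on version B (the rewrite author's own statement) =====
-- stated objective: alternative
-- what changed: A dedups by a seen-set of lowercase keys while scanning in input order and then sorts; B stable-sorts first and removes duplicates in one adjacent pass comparing each key with the previous kept key, relying on sort stability to keep the first casing seen.
import Mathlib
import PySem

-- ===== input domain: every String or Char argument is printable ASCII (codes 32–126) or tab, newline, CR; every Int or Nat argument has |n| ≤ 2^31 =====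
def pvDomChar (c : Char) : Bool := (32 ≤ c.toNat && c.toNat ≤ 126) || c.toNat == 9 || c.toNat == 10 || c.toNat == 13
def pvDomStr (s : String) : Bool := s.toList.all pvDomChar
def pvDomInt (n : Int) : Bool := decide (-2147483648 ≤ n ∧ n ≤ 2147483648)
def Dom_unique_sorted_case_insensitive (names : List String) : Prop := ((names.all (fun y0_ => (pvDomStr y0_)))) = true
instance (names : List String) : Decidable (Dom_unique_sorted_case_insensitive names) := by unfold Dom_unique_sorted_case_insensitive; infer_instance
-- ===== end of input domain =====

-- B replaces A's seen-set dedup-then-sort by a stable sort followed by one adjacent-key dedup pass (alternative decomposition, same cost).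

-- ===== PORT A =====
def unique_sorted_case_insensitive (names : List String) : List String :=
  let st := names.foldl
    (fun (st : PySem.Set String × List String) n =>
      let key := PySem.Str.lower n
      if PySem.Set.contains st.1 key then st
      else (PySem.Set.add st.1 key, st.2 ++ [n]))
    (PySem.Set.empty, [])
  PySem.List.sorted st.2 (fun n => PySem.Str.lower n) false

-- ===== PORT B =====
def unique_sorted_case_insensitive_alt (names : List String) : List String :=
  let ordered := PySem.List.sorted names (fun n => PySem.Str.lower n) false
  let st := ordered.foldl
    (fun (st : Option String × List String) n =>
      let k := PySem.Str.lower n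
      if some k = st.1 then st
      else (some k, st.2 ++ [n]))
    ((none : Option String), [])
  st.2

-- ===== PRECONDITION & SPEC =====
def Spec_unique_sorted_case_insensitive (names : List String) (out : List String) : Prop := out = unique_sorted_case_insensitive_alt names
instance (names : List String) (out : List String) : Decidable (Spec_unique_sorted_case_insensitive names out) := by unfold Spec_unique_sorted_case_insensitive; infer_instance

-- ===== CLAIM (what is proved, stated in full; the proofs are below) =====
def Claim_equal_unique_sorted_case_insensitive : Prop := ∀ (names : List String), Dom_unique_sorted_case_insensitive names → Spec_unique_sorted_case_insensitive names (unique_sorted_case_insensitive names)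

-- ===== LEMMAS AND PROOFS =====

lemma pvContains_iff (s : PySem.Set String) (c : String) :
    PySem.Set.contains s c = true ↔ c ∈ s := by
  simp [PySem.Set.contains]

-- first-occurrence dedup by lowercase key (the loop body of A), recursion form
def pvFo (seen : PySem.Set String) : List String → List String
  | [] => []
  | n :: ns =>
    if PySem.Str.lower n ∈ seen then pvFo seen ns
    else n :: pvFo (PySem.Set.add seen (PySem.Str.lower n)) ns

-- the seen-set after A's loop
def pvFoS (seen : PySem.Set String) : List String → PySem.Set String
  | [] => seen
  | n :: ns =>
    if PySem.Str.lower n ∈ seen then pvFoS seen ns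
    else pvFoS (PySem.Set.add seen (PySem.Str.lower n)) ns

-- adjacent dedup by lowercase key (the loop body of B), recursion form
def pvAd (prev : Option String) : List String → List String
  | [] => []
  | n :: ns =>
    if some (PySem.Str.lower n) = prev then pvAd prev ns
    else n :: pvAd (some (PySem.Str.lower n)) ns

lemma pvFo_foldl (ns : List String) : ∀ (seen : PySem.Set String) (acc : List String),
    (ns.foldl
      (fun (st : PySem.Set String × List String) n =>
        if PySem.Str.lower n ∈ st.1 then st
        else (PySem.Set.add st.1 (PySem.Str.lower n), st.2 ++ [n]))
      (seen, acc)) = (pvFoS seen ns, acc ++ pvFo seen ns) := by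
  induction ns with
  | nil => intro seen acc; simp [pvFo, pvFoS]
  | cons n ns ih =>
    intro seen acc
    by_cases h : PySem.Str.lower n ∈ seen
    · simp [List.foldl_cons, pvFo, pvFoS, h, ih]
    · simp [List.foldl_cons, pvFo, pvFoS, h, ih]

lemma pvAd_foldl (ns : List String) : ∀ (prev : Option String) (acc : List String),
    (ns.foldl
      (fun (st : Option String × List String) n =>
        let k := PySem.Str.lower n
        if some k = st.1 then st
        else (some k, st.2 ++ [n]))
      (prev, acc)).2 = acc ++ pvAd prev ns := by
  induction ns with
  | nil => intro prev acc; simp [pvAd]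
  | cons n ns ih =>
    intro prev acc
    by_cases h : some (PySem.Str.lower n) = prev
    · simp [List.foldl_cons, h, pvAd, ih]
    · simp [List.foldl_cons, h, pvAd, ih]

lemma pvMem_foS (ns : List String) : ∀ (seen : PySem.Set String) (c : String),
    (c ∈ pvFoS seen ns ↔ c ∈ seen ∨ ∃ y ∈ ns, PySem.Str.lower y = c) := by
  induction ns with
  | nil => intro seen c; simp [pvFoS]
  | cons n ns ih =>
    intro seen c
    by_cases h : PySem.Str.lower n ∈ seen
    · rw [show pvFoS seen (n :: ns) = pvFoS seen ns by simp [pvFoS, h]]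
      rw [ih]
      constructor
      · rintro (hc | hc)
        · exact Or.inl hc
        · exact Or.inr ⟨hc.choose, List.mem_cons_of_mem _ hc.choose_spec.1, hc.choose_spec.2⟩
      · rintro (hc | ⟨y, hy, hyc⟩)
        · exact Or.inl hc
        · rcases List.mem_cons.mp hy with rfl | hy
          · exact Or.inl (hyc ▸ h)
          · exact Or.inr ⟨y, hy, hyc⟩
    · rw [show pvFoS seen (n :: ns) = pvFoS (PySem.Set.add seen (PySem.Str.lower n)) ns by
        simp [pvFoS, h]]
      rw [ih]
      rw [PySem.Set.mem_add]
      constructor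
      · rintro ((hc | rfl) | ⟨y, hy, hyc⟩)
        · exact Or.inl hc
        · exact Or.inr ⟨n, List.mem_cons_self, rfl⟩
        · exact Or.inr ⟨y, List.mem_cons_of_mem _ hy, hyc⟩
      · rintro (hc | ⟨y, hy, hyc⟩)
        · exact Or.inl (Or.inl hc)
        · rcases List.mem_cons.mp hy with rfl | hy
          · exact Or.inl (Or.inr hyc.symm)
          · exact Or.inr ⟨y, hy, hyc⟩

lemma pvFo_append (ns : List String) : ∀ (seen : PySem.Set String) (x : String),
    pvFo seen (ns ++ [x]) =
      if PySem.Str.lower x ∈ pvFoS seen ns then pvFo seen ns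
      else pvFo seen ns ++ [x] := by
  induction ns with
  | nil => intro seen x; simp [pvFo, pvFoS]
  | cons n ns ih =>
    intro seen x
    by_cases h : PySem.Str.lower n ∈ seen
    · simp only [List.cons_append, pvFo, pvFoS, h, if_pos]
      rw [ih]
    · simp only [List.cons_append, pvFo, pvFoS, h, if_neg, not_false_iff]
      rw [ih]
      split <;> simp

-- A's value as the recursion form
lemma pvA_eq (names : List String) :
    unique_sorted_case_insensitive names =
      PySem.List.sorted (pvFo PySem.Set.empty names) (fun n => PySem.Str.lower n) false := by
  unfold unique_sorted_case_insensitive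
  simp only [pvContains_iff]
  rw [pvFo_foldl]
  simp [PySem.Set.empty]

-- B's value as the recursion form
lemma pvB_eq (names : List String) :
    unique_sorted_case_insensitive_alt names =
      pvAd none (PySem.List.sorted names (fun n => PySem.Str.lower n) false) := by
  unfold unique_sorted_case_insensitive_alt
  rw [pvAd_foldl]
  simp

-- sorted over a snoc is one insertion
lemma pvSorted_snoc (ns : List String) (x : String) :
    PySem.List.sorted (ns ++ [x]) (fun n => PySem.Str.lower n) false =
      PySem.List.insertBy (fun a b => decide (PySem.Str.lower a < PySem.Str.lower b)) x
        (PySem.List.sorted ns (fun n => PySem.Str.lower n) false) := by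
  rw [PySem.List.sorted_eq_foldl_insertBy, PySem.List.sorted_eq_foldl_insertBy, List.foldl_append]
  simp

-- L1: inserting x whose key already occurs in a sorted list does not change the adjacent dedup
lemma pvAd_insert_mem (x : String) : ∀ (s : List String) (prev : Option String),
    s.Pairwise (fun a b => PySem.Str.lower a ≤ PySem.Str.lower b) →
    (∃ z ∈ s, PySem.Str.lower z = PySem.Str.lower x) →
    pvAd prev (PySem.List.insertBy (fun a b => decide (PySem.Str.lower a < PySem.Str.lower b)) x s) = pvAd prev s := by
  intro s
  induction s with
  | nil => rintro prev _ ⟨z, hz, _⟩; exact absurd hz (by simp)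
  | cons y ys ih =>
    rintro prev hp ⟨z, hz, hzk⟩
    have hyx : ¬ (PySem.Str.lower x < PySem.Str.lower y) := by
      rcases List.mem_cons.mp hz with rfl | hz'
      · simp [hzk]
      · have := (List.pairwise_cons.mp hp).1 z hz'
        rw [hzk] at this
        exact not_lt.mpr this
    rw [show PySem.List.insertBy (fun a b => decide (PySem.Str.lower a < PySem.Str.lower b)) x (y :: ys)
          = y :: PySem.List.insertBy (fun a b => decide (PySem.Str.lower a < PySem.Str.lower b)) x ys by
        simp only [PySem.List.insertBy]; rw [if_neg (by simpa using hyx)]]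
    by_cases hzy : ∃ z' ∈ ys, PySem.Str.lower z' = PySem.Str.lower x
    · by_cases hprev : some (PySem.Str.lower y) = prev
      · simp only [pvAd, hprev, if_pos]
        exact ih prev (List.pairwise_cons.mp hp).2 hzy
      · simp only [pvAd, hprev, if_neg, not_false_iff]
        rw [ih (some (PySem.Str.lower y)) (List.pairwise_cons.mp hp).2 hzy]
    · -- the witness must be y itself
      have hyk : PySem.Str.lower y = PySem.Str.lower x := by
        rcases List.mem_cons.mp hz with rfl | hz'
        · exact hzk
        · exact absurd ⟨z, hz', hzk⟩ hzy
      have hins : PySem.List.insertBy (fun a b => decide (PySem.Str.lower a < PySem.Str.lower b)) x ys = x :: ys := by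
        cases ys with
        | nil => rfl
        | cons y' t =>
          have h1 : PySem.Str.lower y ≤ PySem.Str.lower y' := (List.pairwise_cons.mp hp).1 y' List.mem_cons_self
          have h2 : PySem.Str.lower y' ≠ PySem.Str.lower x := fun h => hzy ⟨y', List.mem_cons_self, h⟩
          have h3 : PySem.Str.lower x < PySem.Str.lower y' := lt_of_le_of_ne (hyk ▸ h1) (Ne.symm h2)
          simp only [PySem.List.insertBy]; rw [if_pos (decide_eq_true h3)]
      rw [hins]
      by_cases hprev : some (PySem.Str.lower y) = prev
      · have hx : some (PySem.Str.lower x) = prev := hyk ▸ hprev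
        simp only [pvAd, hprev, hx, if_pos]
      · simp only [pvAd, hprev, if_neg, not_false_iff]
        have hx : some (PySem.Str.lower x) = some (PySem.Str.lower y) := by rw [hyk]
        simp only [hx, if_pos]

-- L2: inserting x with a fresh key commutes with the adjacent dedup
lemma pvAd_insert_new (x : String) : ∀ (s : List String) (prev : Option String),
    s.Pairwise (fun a b => PySem.Str.lower a ≤ PySem.Str.lower b) →
    (∀ z ∈ s, PySem.Str.lower z ≠ PySem.Str.lower x) →
    (∀ c, prev = some c → c < PySem.Str.lower x) →
    pvAd prev (PySem.List.insertBy (fun a b => decide (PySem.Str.lower a < PySem.Str.lower b)) x s) =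
      PySem.List.insertBy (fun a b => decide (PySem.Str.lower a < PySem.Str.lower b)) x (pvAd prev s) := by
  intro s
  induction s with
  | nil =>
    intro prev _ _ hprev
    have hne : ¬ (some (PySem.Str.lower x) = prev) :=
      fun h => lt_irrefl _ (hprev _ h.symm)
    simp only [PySem.List.insertBy, pvAd, hne, if_neg, not_false_iff]
  | cons y ys ih =>
    intro prev hp hfresh hprev
    have hyx : PySem.Str.lower y ≠ PySem.Str.lower x := hfresh y List.mem_cons_self
    by_cases hlt : PySem.Str.lower x < PySem.Str.lower y
    · have hprevy : ¬ (some (PySem.Str.lower y) = prev) :=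
        fun h => absurd (hprev _ h.symm) (not_lt.mpr hlt.le)
      have hprevx : ¬ (some (PySem.Str.lower x) = prev) :=
        fun h => lt_irrefl _ (hprev _ h.symm)
      have hxy : ¬ (some (PySem.Str.lower y) = some (PySem.Str.lower x)) := by
        simpa using hyx
      rw [show PySem.List.insertBy (fun a b => decide (PySem.Str.lower a < PySem.Str.lower b)) x (y :: ys)
            = x :: y :: ys by simp only [PySem.List.insertBy]; rw [if_pos (decide_eq_true hlt)]]
      rw [show pvAd prev (y :: ys) = y :: pvAd (some (PySem.Str.lower y)) ys by
        simp only [pvAd, hprevy, if_neg, not_false_iff]]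
      rw [show PySem.List.insertBy (fun a b => decide (PySem.Str.lower a < PySem.Str.lower b)) x
            (y :: pvAd (some (PySem.Str.lower y)) ys)
            = x :: y :: pvAd (some (PySem.Str.lower y)) ys by
        simp only [PySem.List.insertBy]; rw [if_pos (decide_eq_true hlt)]]
      simp only [pvAd, hprevx, hxy, if_neg, not_false_iff]
    · have hylt : PySem.Str.lower y < PySem.Str.lower x :=
        lt_of_le_of_ne (not_lt.mp hlt) hyx
      rw [show PySem.List.insertBy (fun a b => decide (PySem.Str.lower a < PySem.Str.lower b)) x (y :: ys)
            = y :: PySem.List.insertBy (fun a b => decide (PySem.Str.lower a < PySem.Str.lower b)) x ys by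
        simp only [PySem.List.insertBy]; rw [if_neg (by simpa using hlt)]]
      by_cases hpy : some (PySem.Str.lower y) = prev
      · simp only [pvAd, hpy, if_pos]
        exact ih prev (List.pairwise_cons.mp hp).2 (fun z hz => hfresh z (List.mem_cons_of_mem _ hz)) hprev
      · simp only [pvAd, hpy, if_neg, not_false_iff]
        rw [ih (some (PySem.Str.lower y)) (List.pairwise_cons.mp hp).2
            (fun z hz => hfresh z (List.mem_cons_of_mem _ hz))
            (by rintro c ⟨rfl⟩; exact hylt)]
        rw [show PySem.List.insertBy (fun a b => decide (PySem.Str.lower a < PySem.Str.lower b)) x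
              (y :: pvAd (some (PySem.Str.lower y)) ys)
              = y :: PySem.List.insertBy (fun a b => decide (PySem.Str.lower a < PySem.Str.lower b)) x
                  (pvAd (some (PySem.Str.lower y)) ys) by
          simp only [PySem.List.insertBy]; rw [if_neg (by simpa using hlt)]]

-- main: adjacent dedup after sorting = sorting after first-occurrence dedup
lemma pvMain (names : List String) :
    pvAd none (PySem.List.sorted names (fun n => PySem.Str.lower n) false) =
      PySem.List.sorted (pvFo PySem.Set.empty names) (fun n => PySem.Str.lower n) false := by
  induction names using List.reverseRecOn with
  | nil => rfl
  | append_singleton ns x ih =>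
    rw [pvSorted_snoc, pvFo_append]
    by_cases h : ∃ y ∈ ns, PySem.Str.lower y = PySem.Str.lower x
    · have hc : PySem.Str.lower x ∈ pvFoS PySem.Set.empty ns :=
        (pvMem_foS ns PySem.Set.empty _).mpr (Or.inr h)
      rw [if_pos hc, ← ih]
      exact pvAd_insert_mem x _ none
        (PySem.List.sorted_pairwise ns (fun n => PySem.Str.lower n))
        (by rcases h with ⟨y, hy, hyk⟩; exact ⟨y, (PySem.List.mem_sorted ns _ false y).mpr hy, hyk⟩)
    · have hc : ¬ (PySem.Str.lower x ∈ pvFoS PySem.Set.empty ns) := by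
        intro hcc
        rcases (pvMem_foS ns PySem.Set.empty _).mp hcc with h0 | h1
        · simp [PySem.Set.empty] at h0
        · exact h h1
      rw [if_neg hc, pvSorted_snoc, ← ih]
      exact pvAd_insert_new x _ none
        (PySem.List.sorted_pairwise ns (fun n => PySem.Str.lower n))
        (fun z hz => fun hzx => h ⟨z, (PySem.List.mem_sorted ns _ false z).mp hz, hzx⟩)
        (by intro c hc'; cases hc')

-- ===== VERDICT (by name: the statement is the Claim_ definition above) =====
theorem unique_sorted_case_insensitive_spec : Claim_equal_unique_sorted_case_insensitive := by
  intro names _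
  unfold Spec_unique_sorted_case_insensitive
  rw [pvA_eq, pvB_eq, pvMain]
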